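-- pv_equiv track=rewrite | github.com/Sidrti/AgensiumBackendV2 | agents/customer_segmentation_agent.py | _segment_labels
-- ===== SOURCE A (Python) =====
-- from typing import Any, Dict, List, Optional, Tuple
--
-- def _segment_labels(segment_count: int, mode: str) -> Tuple[List[str], List[str]]:
--     """Return (labels, descriptions) aligned with segment_id 1..segment_count."""
--     segment_count = max(2, min(int(segment_count), 10))
--
--     if segment_count == 5:
--         if mode == "rfm":
--             labels = ["Champions", "Loyal", "Potential", "At Risk", "Lost"]
--             desc = [
--                 "High value, frequent, and very recent customers.",
--                 "Strong repeat customers with good value.",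
--                 "Decent customers who could be nurtured to grow.",
--                 "Previously engaged customers showing signs of churn.",
--                 "Low engagement and low value customers.",
--             ]
--         else:
--             labels = ["Top Value", "High Value", "Mid Value", "Low Value", "Lowest Value"]
--             desc = [
--                 "Highest total value customers.",
--                 "Above-average total value customers.",
--                 "Average total value customers.",
--                 "Below-average total value customers.",
--                 "Lowest total value customers.",
--             ]
--         return labels, desc
--
--     labels = [f"Segment {i}" for i in range(1, segment_count + 1)]
--     if mode == "rfm":
--         desc = [
--             "Higher composite RFM score" if i <= max(1, segment_count // 3) else
--             "Mid composite RFM score" if i <= max(2, (2 * segment_count) // 3) else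
--             "Lower composite RFM score"
--             for i in range(1, segment_count + 1)
--         ]
--     else:
--         desc = [
--             "Higher total value" if i <= max(1, segment_count // 3) else
--             "Mid total value" if i <= max(2, (2 * segment_count) // 3) else
--             "Lower total value"
--             for i in range(1, segment_count + 1)
--         ]
--     return labels, desc
-- ===== SOURCE B (Python) =====
-- def _segment_labels(segment_count, mode):
--     n = max(2, min(int(segment_count), 10))
--     if n == 5:
--         if mode == "rfm":
--             return (
--                 ["Champions", "Loyal", "Potential", "At Risk", "Lost"],
--                 [
--                     "High value, frequent, and very recent customers.",
--                     "Strong repeat customers with good value.",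
--                     "Decent customers who could be nurtured to grow.",
--                     "Previously engaged customers showing signs of churn.",
--                     "Low engagement and low value customers.",
--                 ],
--             )
--         return (
--             ["Top Value", "High Value", "Mid Value", "Low Value", "Lowest Value"],
--             [
--                 "Highest total value customers.",
--                 "Above-average total value customers.",
--                 "Average total value customers.",
--                 "Below-average total value customers.",
--                 "Lowest total value customers.",
--             ],
--         )
--     labels = [f"Segment {i}" for i in range(1, n + 1)]
--     h = max(1, n // 3)
--     m = max(2, (2 * n) // 3)
--     if mode == "rfm":
--         hi, mid, lo = "Higher composite RFM score", "Mid composite RFM score", "Lower composite RFM score"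
--     else:
--         hi, mid, lo = "Higher total value", "Mid total value", "Lower total value"
--     desc = [hi] * h + [mid] * (m - h) + [lo] * (n - m)
--     return labels, desc
-- ===== Notes on version B (the rewrite author's own statement) =====
-- stated objective: alternative
-- what changed: The general branch's per-index nested-ternary comprehension over range(1,n+1) is replaced by computing the two tier boundaries once and emitting the description list as a concatenation of three repeated blocks [hi]*h + [mid]*(m-h) + [lo]*(n-m).
import Mathlib
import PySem

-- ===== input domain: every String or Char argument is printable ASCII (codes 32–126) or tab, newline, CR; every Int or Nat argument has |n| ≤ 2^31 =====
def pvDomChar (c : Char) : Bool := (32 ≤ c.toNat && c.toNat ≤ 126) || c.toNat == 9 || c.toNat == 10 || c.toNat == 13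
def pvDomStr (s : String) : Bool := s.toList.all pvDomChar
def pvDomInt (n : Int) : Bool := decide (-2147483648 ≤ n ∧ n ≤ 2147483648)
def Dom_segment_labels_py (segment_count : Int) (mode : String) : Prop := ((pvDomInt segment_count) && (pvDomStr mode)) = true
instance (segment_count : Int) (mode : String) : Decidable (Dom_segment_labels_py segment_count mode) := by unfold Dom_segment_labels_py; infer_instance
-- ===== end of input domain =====

-- B replaces the per-index nested-ternary comprehension with boundary counts and block concatenation of repeated strings (alternative decomposition, same cost).

-- ===== PORT A =====
def segment_labels_py (segment_count : Int) (mode : String) : List String × List String :=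
  let sc : Int := max 2 (min segment_count 10)
  if sc == 5 then
    if mode == "rfm" then
      (["Champions", "Loyal", "Potential", "At Risk", "Lost"],
       ["High value, frequent, and very recent customers.",
        "Strong repeat customers with good value.",
        "Decent customers who could be nurtured to grow.",
        "Previously engaged customers showing signs of churn.",
        "Low engagement and low value customers."])
    else
      (["Top Value", "High Value", "Mid Value", "Low Value", "Lowest Value"],
       ["Highest total value customers.",
        "Above-average total value customers.",
        "Average total value customers.",
        "Below-average total value customers.",
        "Lowest total value customers."])
  else
    let labels := (PySem.List.pyRange 1 (sc + 1) 1).map (fun i => "Segment " ++ PySem.Int.toStr i)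
    let desc :=
      if mode == "rfm" then
        (PySem.List.pyRange 1 (sc + 1) 1).map (fun i =>
          if i ≤ max 1 (PySem.Int.floordiv sc 3) then "Higher composite RFM score"
          else if i ≤ max 2 (PySem.Int.floordiv (2 * sc) 3) then "Mid composite RFM score"
          else "Lower composite RFM score")
      else
        (PySem.List.pyRange 1 (sc + 1) 1).map (fun i =>
          if i ≤ max 1 (PySem.Int.floordiv sc 3) then "Higher total value"
          else if i ≤ max 2 (PySem.Int.floordiv (2 * sc) 3) then "Mid total value"
          else "Lower total value")
    (labels, desc)

-- ===== PORT B =====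
def segment_labels_py_alt (segment_count : Int) (mode : String) : List String × List String :=
  let n : Int := max 2 (min segment_count 10)
  if n == 5 then
    if mode == "rfm" then
      (["Champions", "Loyal", "Potential", "At Risk", "Lost"],
       ["High value, frequent, and very recent customers.",
        "Strong repeat customers with good value.",
        "Decent customers who could be nurtured to grow.",
        "Previously engaged customers showing signs of churn.",
        "Low engagement and low value customers."])
    else
      (["Top Value", "High Value", "Mid Value", "Low Value", "Lowest Value"],
       ["Highest total value customers.",
        "Above-average total value customers.",
        "Average total value customers.",
        "Below-average total value customers.",
        "Lowest total value customers."])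
  else
    let labels := (PySem.List.pyRange 1 (n + 1) 1).map (fun i => "Segment " ++ PySem.Int.toStr i)
    let h : Int := max 1 (PySem.Int.floordiv n 3)
    let m : Int := max 2 (PySem.Int.floordiv (2 * n) 3)
    let triple : String × String × String :=
      if mode == "rfm" then
        ("Higher composite RFM score", "Mid composite RFM score", "Lower composite RFM score")
      else
        ("Higher total value", "Mid total value", "Lower total value")
    let desc := List.replicate h.toNat triple.1 ++ List.replicate (m - h).toNat triple.2.1
                ++ List.replicate (n - m).toNat triple.2.2
    (labels, desc)

-- ===== PRECONDITION & SPEC =====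
def Spec_segment_labels_py (segment_count : Int) (mode : String) (out : List String × List String) : Prop := out = segment_labels_py_alt segment_count mode
instance (segment_count : Int) (mode : String) (out : List String × List String) : Decidable (Spec_segment_labels_py segment_count mode out) := by unfold Spec_segment_labels_py; infer_instance

-- ===== CLAIM (what is proved, stated in full; the proofs are below) =====
def Claim_equal_segment_labels_py : Prop := ∀ (segment_count : Int) (mode : String), Dom_segment_labels_py segment_count mode → Spec_segment_labels_py segment_count mode (segment_labels_py segment_count mode)

-- ===== LEMMAS AND PROOFS =====

-- ===== VERDICT (by name: the statement is the Claim_ definition above) =====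
theorem segment_labels_py_spec : Claim_equal_segment_labels_py := by
  intro sc mode _
  unfold Spec_segment_labels_py segment_labels_py segment_labels_py_alt
  have hlo : (2 : Int) ≤ max 2 (min sc 10) := le_max_left _ _
  have hhi : max 2 (min sc 10) ≤ 10 := by omega
  generalize hk : max 2 (min sc 10) = k at *
  by_cases hm : (mode == "rfm") = true <;>
    interval_cases k <;> simp only [hm, if_true, if_false, Bool.false_eq_true] <;> decide
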